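-- pv_equiv track=rewrite | github.com/WiiXLinux/Einfuerung-in-die-Algorithmik-SS23-CAU-Kiel | HA7/A7.2.py | bin_inc
-- ===== SOURCE A (Python) =====
-- def bin_inc(list_to_increment: list):
--     """
--     Non-mutative bitwise incrementation of a binary number represented as a list.
--     Runtime analysis:
--     n is proportional to the length of list_to_increment:
--     Has O(n) runtime in the average case and maximal case.
--     Has O(1) runtime in the minimal case that the list_to_increment is empty or has only one element.
--     :param list_to_increment: the list to increment :return: list_to_increment + 1
--     """
--     # Constant runtime
--     new_list = [0] * len(list_to_increment)
--     # Constant runtime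
--     carry = 1
--
--     # Repeat len(list_to_increment) times. In case of carry == 0 after addition,
--     # there will be constantly fewer operations (since we don't have to add anymore),
--     # which doesn't matter for the runtime analysis.
--     for i in range(len(list_to_increment)):
--         # Constant runtime
--         new_list[i] = (list_to_increment[i] ^ carry)  # 0 ^ 0 -> 0, 1 ^ 0 -> 1, 1 ^ 1 -> 0, 0 ^ 0 -> 0
--         # Constant runtime
--         carry = list_to_increment[i] & carry
--         # If there is no carry left over (there was an addition with exact result 0 or 1) then fill the rest and return.
--         # Comparison has constant runtime
--         if carry == 0:
--             # Has O(n) whereas n = len(list_to_increment) - i.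
--             new_list[i + 1:] = list_to_increment[i + 1:]
--             # Constant runtime
--             return new_list
--     # Constant runtime
--     if carry == 1:
--         # Constant runtime
--         new_list.append(1)
--     # Constant runtime
--     return new_list
-- ===== SOURCE B (Python) =====
-- def bin_inc(list_to_increment: list):
--     # Divide and conquer: increment the left half; if its length grew, the carry
--     # overflowed the left half and ripples into the right half, which is then
--     # incremented in turn. Recursion depth is logarithmic in the list length.
--     n = len(list_to_increment)
--     if n == 0:
--         return [1]
--     if n == 1:
--         x = list_to_increment[0]
--         return [x ^ 1] if x & 1 == 0 else [x ^ 1, 1]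
--     m = n // 2
--     r = bin_inc(list_to_increment[:m])
--     if len(r) == m:
--         return r + list_to_increment[m:]
--     return r[:-1] + bin_inc(list_to_increment[m:])
-- ===== Notes on version B (the rewrite author's own statement) =====
-- stated objective: alternative
-- what changed: A runs a left-to-right index loop with a mutable carry over a pre-allocated result array; B is a divide-and-conquer recursion: it increments the left half of the list and, only if that half overflowed (its length grew), increments the right half too, stitching the halves together with slices.
import Mathlib
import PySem

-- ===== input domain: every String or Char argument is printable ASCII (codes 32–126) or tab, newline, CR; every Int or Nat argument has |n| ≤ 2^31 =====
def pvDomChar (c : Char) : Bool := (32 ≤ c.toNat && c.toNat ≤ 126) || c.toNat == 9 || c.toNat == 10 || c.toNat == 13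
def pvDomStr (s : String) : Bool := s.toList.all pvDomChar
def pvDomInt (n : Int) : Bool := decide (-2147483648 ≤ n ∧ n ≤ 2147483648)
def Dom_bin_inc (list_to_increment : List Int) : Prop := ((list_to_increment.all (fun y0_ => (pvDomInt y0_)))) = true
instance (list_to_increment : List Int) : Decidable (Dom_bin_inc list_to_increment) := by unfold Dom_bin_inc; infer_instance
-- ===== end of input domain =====

-- B replaces A's index loop with a mutable carry over a pre-allocated array by a
-- divide-and-conquer recursion: increment the left half, and only on overflow the right half.

-- ===== PORT A =====
def bin_inc_go (L : List Int) (new_list : List Int) (carry : Int) (i : Nat) : List Int :=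
  if h : i < L.length then
    let nl := new_list.set i (PySem.Int.bxor L[i] carry)
    let c := PySem.Int.band L[i] carry
    if c = 0 then
      -- new_list[i + 1:] = list_to_increment[i + 1:]; return new_list
      nl.take (i + 1) ++ L.drop (i + 1)
    else bin_inc_go L nl c (i + 1)
  else if carry = 1 then new_list ++ [1] else new_list
termination_by L.length - i

def bin_inc (list_to_increment : List Int) : List Int :=
  bin_inc_go list_to_increment (List.replicate list_to_increment.length 0) 1 0

-- ===== PORT B =====
def bin_inc_alt (list_to_increment : List Int) : List Int :=
  match h : list_to_increment with
  | [] => [1]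
  | [x] => if PySem.Int.band x 1 = 0 then [PySem.Int.bxor x 1]
           else [PySem.Int.bxor x 1, 1]
  | _ :: _ :: _ =>
      let m := list_to_increment.length / 2
      let r := bin_inc_alt (list_to_increment.take m)
      if r.length = m then r ++ list_to_increment.drop m
      else r.dropLast ++ bin_inc_alt (list_to_increment.drop m)
termination_by list_to_increment.length
decreasing_by
  · subst h; simp only [List.length_take, List.length_cons]; omega
  · subst h; simp only [List.length_drop, List.length_cons]; omega

-- ===== PRECONDITION & SPEC =====
def Spec_bin_inc (list_to_increment : List Int) (out : List Int) : Prop := out = bin_inc_alt list_to_increment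
instance (list_to_increment : List Int) (out : List Int) : Decidable (Spec_bin_inc list_to_increment out) := by unfold Spec_bin_inc; infer_instance

-- ===== CLAIM (what is proved, stated in full; the proofs are below) =====
def Claim_equal_bin_inc : Prop := ∀ (list_to_increment : List Int), Dom_bin_inc list_to_increment → Spec_bin_inc list_to_increment (bin_inc list_to_increment)

-- ===== LEMMAS AND PROOFS =====

-- Reference function used only by the proofs: the elementwise carry recursion.
def incSpec : List Int → List Int
  | [] => [1]
  | x :: t => if PySem.Int.band x 1 = 0 then PySem.Int.bxor x 1 :: t
              else PySem.Int.bxor x 1 :: incSpec t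

-- `x & 1` in Python is always 0 or 1 (also for negative x).
lemma band_one_cases (a : Int) : PySem.Int.band a 1 = 0 ∨ PySem.Int.band a 1 = 1 := by
  rw [PySem.Int.band_one]
  have h1 := PySem.Int.mod_nonneg a (b := 2) (by norm_num)
  have h2 := PySem.Int.mod_lt a (b := 2) (by norm_num)
  omega

lemma incSpec_ne_nil (l : List Int) : incSpec l ≠ [] := by
  cases l with
  | nil => simp [incSpec]
  | cons x t => unfold incSpec; split <;> simp

-- How the carry recursion splits over an append: the right part is incremented
-- exactly when the left part overflowed (its result is one element longer).
lemma incSpec_append (a b : List Int) :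
    incSpec (a ++ b) =
      if (incSpec a).length = a.length then incSpec a ++ b
      else (incSpec a).dropLast ++ incSpec b := by
  induction a with
  | nil => simp [incSpec]
  | cons x t ih =>
    rcases band_one_cases x with hc | hc
    · simp only [List.cons_append, incSpec, hc]
      simp
    · have hne : ¬ PySem.Int.band x 1 = 0 := by rw [hc]; norm_num
      simp only [List.cons_append, incSpec, if_neg hne]
      rw [ih]
      by_cases h : (incSpec t).length = t.length
      · rw [if_pos h, if_pos (by simp [h])]
      · rw [if_neg h, if_neg (by simp [h])]
        rw [List.dropLast_cons_of_ne_nil (incSpec_ne_nil t)]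
        simp

-- The divide-and-conquer port computes the carry recursion (strong induction on length).
lemma alt_eq_incSpec_aux : ∀ (n : Nat) (L : List Int), L.length ≤ n → bin_inc_alt L = incSpec L := by
  intro n
  induction n with
  | zero =>
    intro L hL
    have : L = [] := List.eq_nil_of_length_eq_zero (by omega)
    subst this
    simp [bin_inc_alt, incSpec]
  | succ k ih =>
    intro L hL
    match L with
    | [] => simp [bin_inc_alt, incSpec]
    | [x] =>
      rcases band_one_cases x with hc | hc
      · simp [bin_inc_alt, incSpec, hc]
      · simp [bin_inc_alt, incSpec, hc]
    | x :: y :: t =>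
      rw [bin_inc_alt]
      have hm : (x :: y :: t).length / 2 < (x :: y :: t).length := by
        simp only [List.length_cons]; omega
      have h1 : ((x :: y :: t).take ((x :: y :: t).length / 2)).length ≤ k := by
        simp only [List.length_take, List.length_cons] at *; omega
      have h2 : ((x :: y :: t).drop ((x :: y :: t).length / 2)).length ≤ k := by
        simp only [List.length_drop, List.length_cons] at *; omega
      rw [ih _ h1, ih _ h2]
      conv_rhs => rw [← List.take_append_drop (((x :: y :: t).length) / 2) (x :: y :: t)]
      rw [incSpec_append]
      have hlen : ((x :: y :: t).take ((x :: y :: t).length / 2)).length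
          = (x :: y :: t).length / 2 := by
        simp only [List.length_take, List.length_cons]; omega
      rw [hlen]

lemma alt_eq_incSpec (L : List Int) : bin_inc_alt L = incSpec L :=
  alt_eq_incSpec_aux L.length L le_rfl

lemma take_set_succ (l : List Int) (v : Int) (i : Nat) (h : i < l.length) :
    (l.set i v).take (i + 1) = l.take i ++ [v] := by
  rw [List.set_eq_take_append_cons_drop, if_pos h, List.take_append]
  simp [Nat.min_eq_left (Nat.le_of_lt h)]

-- Loop invariant for A's carry loop while carry = 1: the final result is the
-- already-flipped prefix followed by the carry recursion on the remaining suffix.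
lemma go_eq (L : List Int) (n : Nat) : ∀ (i : Nat) (nl : List Int),
    L.length - i = n → nl.length = L.length → i ≤ L.length →
    nl.take i = (L.take i).map (fun x => PySem.Int.bxor x 1) →
    bin_inc_go L nl 1 i =
      (L.take i).map (fun x => PySem.Int.bxor x 1) ++ incSpec (L.drop i) := by
  induction n with
  | zero =>
    intro i nl hn hlen hle hinv
    have hi : i = L.length := by omega
    subst hi
    rw [bin_inc_go]
    simp only [lt_irrefl, dite_false, List.drop_length, if_true]
    have : nl.take L.length = nl := List.take_of_length_le (by omega)
    rw [← this, hinv]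
    simp [incSpec]
  | succ m ih =>
    intro i nl hn hlen hle hinv
    have hi : i < L.length := by omega
    rw [bin_inc_go]
    simp only [dif_pos hi]
    have hdrop : L.drop i = L[i] :: L.drop (i + 1) := (List.getElem_cons_drop hi).symm
    have htake : L.take (i + 1) = L.take i ++ [L[i]] := List.take_succ_eq_append_getElem hi
    have hset : (nl.set i (PySem.Int.bxor L[i] 1)).take (i + 1)
        = (L.take (i + 1)).map (fun x => PySem.Int.bxor x 1) := by
      rw [take_set_succ _ _ _ (by omega), hinv, htake, List.map_append]
      simp only [List.map_cons, List.map_nil]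
    rcases band_one_cases L[i] with hc | hc
    · rw [if_pos hc, hdrop]
      simp only [incSpec, hc]
      simp only [if_true]
      rw [hset, htake, List.map_append]
      simp
    · rw [if_neg (by rw [hc]; norm_num), hc]
      rw [ih (i + 1) (nl.set i (PySem.Int.bxor L[i] 1)) (by omega) (by simpa using hlen)
        (by omega) hset]
      rw [hdrop]
      simp only [incSpec, hc]
      rw [if_neg (by norm_num), htake, List.map_append]
      simp

-- ===== VERDICT (by name: the statement is the Claim_ definition above) =====
theorem bin_inc_spec : Claim_equal_bin_inc := by
  intro L _
  unfold Spec_bin_inc bin_inc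
  rw [go_eq L (L.length - 0) 0 _ rfl (by simp) (by omega) (by simp), alt_eq_incSpec]
  simp
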